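-- pv_equiv track=rewrite | github.com/Yomguithereal/ebbe | ebbe/functions.py | with_prev_and_next
-- ===== SOURCE A (Python) =====
-- def with_prev_and_next(iterable):
--     prev = None
--     iterator = iter(iterable)
--
--     try:
--         last = next(iterator)
--     except StopIteration:
--         return
--
--     for item in iterator:
--         yield prev, last, item
--         prev = last
--         last = item
--
--     yield prev, last, None
-- ===== SOURCE B (Python) =====
-- from itertools import tee, chain, islice
--
-- def with_prev_and_next(iterable):
--     p, c, n = tee(iterable, 3)
--     prevs = chain([None], p)
--     nexts = chain(islice(n, 1, None), [None])
--     yield from zip(prevs, c, nexts)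
-- ===== Notes on version B (the rewrite author's own statement) =====
-- stated objective: idiomatic
-- what changed: Replaced the manual prev/last rolling-state loop with three tee'd iterators shifted by chain/islice and zipped in lockstep.
import Mathlib
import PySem

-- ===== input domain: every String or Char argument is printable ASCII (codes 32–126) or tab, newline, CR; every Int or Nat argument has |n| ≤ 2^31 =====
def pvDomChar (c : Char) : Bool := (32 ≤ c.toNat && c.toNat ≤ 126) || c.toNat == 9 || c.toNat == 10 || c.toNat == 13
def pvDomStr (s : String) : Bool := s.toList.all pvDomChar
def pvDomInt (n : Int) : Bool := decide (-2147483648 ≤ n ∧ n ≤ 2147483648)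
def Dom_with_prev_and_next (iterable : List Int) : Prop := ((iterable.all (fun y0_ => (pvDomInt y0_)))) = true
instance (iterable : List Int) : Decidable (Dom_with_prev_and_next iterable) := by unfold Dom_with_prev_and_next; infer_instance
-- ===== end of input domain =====

-- B replaces A's manual prev/last rolling-state loop with three shifted views of the
-- list zipped in lockstep (idiomatic itertools style); return value equivalence of
-- the yielded triples is what is proved (both are generators in Python).

-- ===== PORT A =====
-- the 'for item in iterator' loop carrying (prev, last), plus the final yield
def with_prev_and_next_loop (prev : Option Int) (last : Int) :
    List Int → List (Option Int × Int × Option Int)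
  | [] => [(prev, last, none)]
  | item :: rest => (prev, last, some item) :: with_prev_and_next_loop (some last) item rest

def with_prev_and_next (iterable : List Int) : List (Option Int × Int × Option Int) :=
  match iterable with
  | [] => []                                   -- next(iterator) raises StopIteration: return
  | last :: rest => with_prev_and_next_loop none last rest

-- ===== PORT B =====
-- prevs = chain([None], p); nexts = chain(islice(n, 1, None), [None]); zip stops at the shortest
def with_prev_and_next_alt (iterable : List Int) : List (Option Int × Int × Option Int) :=
  (none :: iterable.map some).zip
    (iterable.zip ((iterable.drop 1).map some ++ [none]))

-- ===== PRECONDITION & SPEC =====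
def Spec_with_prev_and_next (iterable : List Int) (out : List (Option Int × Int × Option Int)) : Prop := out = with_prev_and_next_alt iterable
instance (iterable : List Int) (out : List (Option Int × Int × Option Int)) : Decidable (Spec_with_prev_and_next iterable out) := by unfold Spec_with_prev_and_next; infer_instance

-- ===== CLAIM (what is proved, stated in full; the proofs are below) =====
def Claim_equal_with_prev_and_next : Prop := ∀ (iterable : List Int), Dom_with_prev_and_next iterable → Spec_with_prev_and_next iterable (with_prev_and_next iterable)

-- ===== LEMMAS AND PROOFS =====
theorem with_prev_and_next_loop_eq (rest : List Int) :
    ∀ (prev : Option Int) (last : Int),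
      with_prev_and_next_loop prev last rest =
        (prev :: (last :: rest).map some).zip
          ((last :: rest).zip (rest.map some ++ [none])) := by
  induction rest with
  | nil => intro prev last; simp [with_prev_and_next_loop]
  | cons i r ih =>
      intro prev last
      simp [with_prev_and_next_loop, ih (some last) i]

-- ===== VERDICT (by name: the statement is the Claim_ definition above) =====
theorem with_prev_and_next_spec : Claim_equal_with_prev_and_next := by
  intro iterable _
  unfold Spec_with_prev_and_next with_prev_and_next with_prev_and_next_alt
  match iterable with
  | [] => rfl
  | last :: rest => simp [with_prev_and_next_loop_eq]
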